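-- pv_equiv track=rewrite | github.com/nvamsi2015/elementary-DS | stacks.py | countMinFlips
-- ===== SOURCE A (Python) =====
-- from collections import deque
-- from collections import deque
-- from collections import deque
-- from collections import deque
-- from collections import deque
-- from collections import deque
-- from collections import deque
-- from collections import deque
--
-- def countMinFlips(expression):
--     length = len(expression)
--     if length % 2:
--         return -1
--
--     stack = deque()
--     for char in expression:
--         if char == '}' and stack:
--             if stack[-1] == '{':
--                 stack.pop()
--             else:
--                 stack.append(char)
--         else:
--             stack.append(char)
--
--     lonely_braces = len(stack)
--     n = 0
--     while stack and stack[-1] == '{':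
--         stack.pop()
--         n+=1
--     return lonely_braces//2 + n % 2
-- ===== SOURCE B (Python) =====
-- def countMinFlips(expression):
--     if len(expression) % 2:
--         return -1
--     s = expression
--     while '{}' in s:
--         s = s.replace('{}', '')
--     n = len(s) - len(s.rstrip('{'))
--     return len(s) // 2 + n % 2
-- ===== Notes on version B (the rewrite author's own statement) =====
-- stated objective: simpler
-- what changed: Replaces A's character-by-character stack simulation plus trailing-pop while-loop by a fixed-point reduction: repeatedly delete adjacent open-close brace pairs with str.replace until none remain, then read the answer off the irreducible string (its length and its trailing run of open braces).
import Mathlib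
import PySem

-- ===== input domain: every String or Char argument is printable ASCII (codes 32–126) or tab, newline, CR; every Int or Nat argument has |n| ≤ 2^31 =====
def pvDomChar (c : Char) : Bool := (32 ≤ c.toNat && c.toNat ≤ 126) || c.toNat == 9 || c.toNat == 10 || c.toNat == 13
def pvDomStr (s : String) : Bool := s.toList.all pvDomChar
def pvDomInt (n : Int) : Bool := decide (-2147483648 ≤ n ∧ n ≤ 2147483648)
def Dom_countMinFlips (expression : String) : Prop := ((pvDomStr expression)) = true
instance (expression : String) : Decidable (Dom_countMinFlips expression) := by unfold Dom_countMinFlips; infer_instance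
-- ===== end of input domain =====

-- B replaces A's single-pass stack simulation by reducing the string to a "{}"-free fixed point
-- (repeated str.replace) and reading the answer off the irreducible string; objective: simpler (return-value equivalence).


-- ===== PORT A =====
-- one iteration of A's for-loop: stack is a List Char, Python append = ++ [c], stack[-1] = getLast?, pop = dropLast
def countMinFlipsStep (stack : List Char) (char : Char) : List Char :=
  if char = '}' ∧ stack ≠ [] then
    if stack.getLast? = some '{' then stack.dropLast
    else stack ++ [char]
  else stack ++ [char]

-- A's trailing while-loop: pop while the stack ends with '{', counting n
def countMinFlipsPop (stack : List Char) (n : Int) : Int :=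
  if h : stack ≠ [] ∧ stack.getLast? = some '{' then
    countMinFlipsPop stack.dropLast (n + 1)
  else n
termination_by stack.length
decreasing_by
  have : stack.length ≠ 0 := by simpa using h.1
  simp [List.length_dropLast]; omega

def countMinFlips (expression : String) : Int :=
  let length : Int := (expression.toList.length : Int)
  if PySem.Int.mod length 2 ≠ 0 then -1
  else
    let stack := expression.toList.foldl countMinFlipsStep []
    let lonely : Int := (stack.length : Int)
    let n := countMinFlipsPop stack 0
    PySem.Int.floordiv lonely 2 + PySem.Int.mod n 2

-- ===== PORT B =====
-- proof-side characterisation of s.replace('{}',''), cited by the port's termination proof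
def pvRepl : List Char → List Char
  | [] => []
  | c :: t =>
    if c = '{' ∧ t.head? = some '}' then pvRepl t.tail
    else c :: pvRepl t
termination_by l => l.length
decreasing_by
  all_goals simp [List.length_tail]

lemma pvRepl_go (fuel : Nat) : ∀ (l acc : List Char), l.length ≤ fuel →
    PySem.Chars.replace.go ['{','}'] [] fuel l acc = acc.reverse ++ pvRepl l := by
  induction fuel with
  | zero =>
    intro l acc h
    have : l = [] := by cases l <;> simp_all
    subst this; simp [PySem.Chars.replace.go, pvRepl]
  | succ m ih =>
    intro l acc h
    match l with
    | [] => simp [PySem.Chars.replace.go, pvRepl]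
    | c :: t =>
      rw [PySem.Chars.replace.go]
      by_cases hp : (['{','}'] : List Char).isPrefixOf (c :: t) = true
      · obtain ⟨t2, ht⟩ : ∃ t2, c :: t = '{' :: '}' :: t2 := by
          rcases List.isPrefixOf_iff_prefix.mp hp with ⟨r, hr⟩
          exact ⟨r, hr.symm⟩
        rw [if_pos hp]
        have hlen : t2.length ≤ m := by
          have : (c :: t).length = t2.length + 2 := by rw [ht]; simp
          omega
        have hd : List.drop (['{','}'] : List Char).length (c :: t) = t2 := by rw [ht]; simp
        rw [hd]
        have : pvRepl (c :: t) = pvRepl t2 := by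
          rw [ht, pvRepl]; simp
        rw [this, ih t2 _ hlen]; simp
      · rw [if_neg hp]
        have hlen : t.length ≤ m := by simp at h; omega
        rw [ih t _ hlen]
        have : pvRepl (c :: t) = c :: pvRepl t := by
          rw [pvRepl]
          have : ¬ (c = '{' ∧ t.head? = some '}') := by
            rintro ⟨rfl, hh⟩
            cases t with
            | nil => simp at hh
            | cons d t' =>
              simp at hh; subst hh
              simp [List.isPrefixOf] at hp
          rw [if_neg this]
        rw [this]; simp

lemma pvReplace_eq (s : List Char) : PySem.Chars.replace s ['{','}'] [] = pvRepl s := by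
  rw [PySem.Chars.replace]
  simp only [List.isEmpty_cons]
  simpa using pvRepl_go s.length s [] le_rfl

lemma pvRepl_length_le (l : List Char) : (pvRepl l).length ≤ l.length := by
  induction l using pvRepl.induct with
  | case1 => simp [pvRepl]
  | case2 c t h ih =>
    rw [pvRepl, if_pos h]
    have h2 : t ≠ [] := by rintro rfl; simp at h
    have h3 : t.length ≠ 0 := by simpa using h2
    have h4 := List.length_tail (l := t)
    simp only [List.length_cons]
    omega
  | case3 c t h ih => rw [pvRepl, if_neg h]; simpa using Nat.succ_le_succ ih

lemma pvRepl_length_lt (l : List Char) (h : (['{','}'] : List Char) <:+: l) :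
    (pvRepl l).length < l.length := by
  induction l using pvRepl.induct with
  | case1 => simp at h
  | case2 c t hc ih =>
    rw [pvRepl, if_pos hc]
    have h1 := pvRepl_length_le t.tail
    have h2 : t ≠ [] := by rintro rfl; simp at hc
    have : t.length ≠ 0 := by simpa using h2
    have := List.length_tail (l := t)
    simp only [List.length_cons]; omega
  | case3 c t hc ih =>
    rw [pvRepl, if_neg hc]
    rcases List.infix_cons_iff.mp h with hpre | hinf
    · exfalso
      rcases hpre with ⟨r, hr⟩
      have hr' : '{' :: '}' :: r = c :: t := hr
      obtain ⟨h1, h2⟩ := List.cons.inj hr'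
      exact hc ⟨h1.symm, by rw [← h2]; rfl⟩
    · simpa using Nat.succ_lt_succ (ih hinf)

-- B's while-loop: s = s.replace('{','}'-pair, '') while '{}' in s
def countMinFlipsFix (s : List Char) : List Char :=
  if h : PySem.Chars.isIn ['{','}'] s = true then
    countMinFlipsFix (PySem.Chars.replace s ['{','}'] [])
  else s
termination_by s.length
decreasing_by
  rw [pvReplace_eq]
  exact pvRepl_length_lt s ((PySem.Chars.isIn_iff_infix _ _).mp h)

def countMinFlips_alt (expression : String) : Int :=
  if PySem.Int.mod ((expression.toList.length : Int)) 2 ≠ 0 then -1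
  else
    let s := countMinFlipsFix expression.toList
    -- s.rstrip('{') ported by hand (exact: drop the trailing run of '{'):
    let stripped := (s.reverse.dropWhile (fun c => c = '{')).reverse
    let n : Int := (s.length : Int) - (stripped.length : Int)
    PySem.Int.floordiv ((s.length : Int)) 2 + PySem.Int.mod n 2

-- ===== PRECONDITION & SPEC =====
def Spec_countMinFlips (expression : String) (out : Int) : Prop := out = countMinFlips_alt expression
instance (expression : String) (out : Int) : Decidable (Spec_countMinFlips expression out) := by unfold Spec_countMinFlips; infer_instance

-- ===== CLAIM (what is proved, stated in full; the proofs are below) =====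
def Claim_equal_countMinFlips : Prop := ∀ (expression : String), Dom_countMinFlips expression → Spec_countMinFlips expression (countMinFlips expression)

-- ===== LEMMAS AND PROOFS =====

-- deleting one adjacent "{}" pair does not change A's stack
lemma pvStep_pair (S t : List Char) :
    List.foldl countMinFlipsStep S ('{' :: '}' :: t) = List.foldl countMinFlipsStep S t := by
  have h1 : countMinFlipsStep S '{' = S ++ ['{'] := by
    simp [countMinFlipsStep]
  have h2 : countMinFlipsStep (S ++ ['{']) '}' = S := by
    simp [countMinFlipsStep]
  simp [List.foldl_cons, h1, h2]

-- A's stack is invariant under one replace pass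
lemma pvStack_repl (l : List Char) : ∀ S : List Char,
    List.foldl countMinFlipsStep S (pvRepl l) = List.foldl countMinFlipsStep S l := by
  induction l using pvRepl.induct with
  | case1 => intro S; simp [pvRepl]
  | case2 c t hc ih =>
    intro S
    obtain ⟨rfl, hh⟩ := hc
    obtain ⟨t', rfl⟩ : ∃ t', t = '}' :: t' := by
      cases t with
      | nil => simp at hh
      | cons d t' => simp at hh; subst hh; exact ⟨t', rfl⟩
    rw [pvRepl, if_pos ⟨rfl, rfl⟩, List.tail_cons, pvStep_pair]
    simpa using ih S
  | case3 c t hc ih =>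
    intro S
    rw [pvRepl, if_neg hc, List.foldl_cons, List.foldl_cons, ih]

-- hence invariant under B's whole fixed-point loop
lemma pvStack_fix (s : List Char) :
    List.foldl countMinFlipsStep [] (countMinFlipsFix s) = List.foldl countMinFlipsStep [] s := by
  induction s using countMinFlipsFix.induct with
  | case1 s h ih =>
    rw [countMinFlipsFix, dif_pos h, ih, pvReplace_eq, pvStack_repl]
  | case2 s h => rw [countMinFlipsFix, dif_neg h]

-- the loop's output contains no "{}"
lemma pvFix_irred (s : List Char) : ¬ (['{','}'] : List Char) <:+: countMinFlipsFix s := by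
  induction s using countMinFlipsFix.induct with
  | case1 s h ih => rw [countMinFlipsFix, dif_pos h]; exact ih
  | case2 s h =>
    rw [countMinFlipsFix, dif_neg h]
    intro hin
    exact h ((PySem.Chars.isIn_iff_infix _ _).mpr hin)

-- a "{}" pair sits inside X ++ '{'::'}'::Y
lemma pvPair_infix (X Y : List Char) : (['{','}'] : List Char) <:+: X ++ '{' :: '}' :: Y :=
  ⟨X, Y, by simp⟩

-- on an irreducible string A's stack loop is the identity (it only ever appends)
lemma pvStack_irred (l : List Char) : ∀ S : List Char,
    ¬ (['{','}'] : List Char) <:+: S ++ l → List.foldl countMinFlipsStep S l = S ++ l := by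
  induction l with
  | nil => intro S _; simp
  | cons c t ih =>
    intro S h
    have hstep : countMinFlipsStep S c = S ++ [c] := by
      unfold countMinFlipsStep
      by_cases hc : c = '}' ∧ S ≠ []
      · rw [if_pos hc]
        by_cases hl : S.getLast? = some '{'
        · exfalso
          obtain ⟨S', hS⟩ : ∃ S', S = S' ++ ['{'] := by
            rcases List.getLast?_eq_some_iff.mp hl with ⟨S', hS'⟩
            exact ⟨S', hS'⟩
          apply h
          rw [hS, hc.1]
          simpa using pvPair_infix S' t
        · rw [if_neg hl]
      · rw [if_neg hc]
    rw [List.foldl_cons, hstep, ih (S ++ [c]) (by simpa using h)]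
    simp

-- the trailing-'{' decomposition of a list
lemma pvTrail_decomp (s : List Char) :
    s = (s.reverse.dropWhile (fun c => c = '{')).reverse ++
        List.replicate (s.reverse.takeWhile (fun c => c = '{')).length '{' ∧
    ((s.reverse.dropWhile (fun c => c = '{')).reverse).getLast? ≠ some '{' := by
  constructor
  · have htw : s.reverse.takeWhile (fun c => c = '{') =
        List.replicate (s.reverse.takeWhile (fun c => c = '{')).length '{' := by
      apply List.eq_replicate_of_mem
      intro b hb
      simpa using List.mem_takeWhile_imp hb
    conv_lhs => rw [← List.reverse_reverse s, ← List.takeWhile_append_dropWhile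
      (p := fun c => c = '{') (l := s.reverse)]
    rw [List.reverse_append]
    congr 1
    rw [htw]; simp
  · rw [List.getLast?_reverse]
    intro hh
    have := List.head?_dropWhile_not (fun c => c = '{') s.reverse
    rw [hh] at this
    simp at this

-- A's pop loop on u ++ '{'^k counts exactly k when u does not end in '{'
lemma pvPop_count (k : Nat) : ∀ (u : List Char), u.getLast? ≠ some '{' → ∀ n : Int,
    countMinFlipsPop (u ++ List.replicate k '{') n = n + k := by
  induction k with
  | zero =>
    intro u hu n
    rw [countMinFlipsPop]
    rw [dif_neg]
    · simp
    · rintro ⟨hne, hl⟩; simp at hl; exact hu hl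
  | succ m ih =>
    intro u hu n
    have hrep : u ++ List.replicate (m + 1) '{' = (u ++ List.replicate m '{') ++ ['{'] := by
      rw [List.replicate_succ' (n := m)]; simp
    rw [countMinFlipsPop, hrep]
    rw [dif_pos ⟨by simp, by rw [List.getLast?_concat]⟩]
    rw [List.dropLast_concat, ih u hu (n + 1)]
    push_cast; ring

-- ===== VERDICT (by name: the statement is the Claim_ definition above) =====
theorem countMinFlips_spec : Claim_equal_countMinFlips := by
  intro expression _
  unfold Spec_countMinFlips countMinFlips countMinFlips_alt
  dsimp only
  by_cases hpar : PySem.Int.mod ((expression.toList.length : Int)) 2 ≠ 0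
  · rw [if_pos hpar, if_pos hpar]
  · rw [if_neg hpar, if_neg hpar]
    -- A's stack equals B's irreducible fixed point
    have hstack : expression.toList.foldl countMinFlipsStep [] = countMinFlipsFix expression.toList := by
      rw [← pvStack_fix expression.toList]
      exact pvStack_irred (countMinFlipsFix expression.toList) []
        (by simpa using pvFix_irred expression.toList)
    rw [hstack]
    set s := countMinFlipsFix expression.toList with hs
    obtain ⟨hdec, hlast⟩ := pvTrail_decomp s
    set u := (s.reverse.dropWhile (fun c => c = '{')).reverse with hu
    set k := (s.reverse.takeWhile (fun c => c = '{')).length with hk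
    have hpop : countMinFlipsPop s 0 = (k : Int) := by
      conv_lhs => rw [hdec]
      rw [pvPop_count k u hlast 0]; ring
    have hlen : s.length = u.length + k := by
      conv_lhs => rw [hdec]
      simp
    have hn : (s.length : Int) - (u.length : Int) = (k : Int) := by
      rw [hlen]; push_cast; ring
    rw [hpop, hn]
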